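-- pv_equiv track=rewrite | github.com/yazanh-beep/python_utils | network_topology_json_to_excel.py | format_aggregate_to_aggregate_uplinks
-- ===== SOURCE A (Python) =====
-- from collections import defaultdict
--
-- def is_aggregate_switch(hostname):
--     """Check if a switch is an aggregate switch based on hostname."""
--     return 'SMSAGG' in hostname.upper()
--
-- def clean_hostname(hostname):
--     """
--     Clean hostname by removing .CAM.INT or other domain suffixes if present.
--     Returns the base hostname.
--     """
--     if not hostname:
--         return hostname
--     # Remove common domain suffixes
--     for suffix in ['.CAM.INT', '.cam.int', '.local']:
--         if hostname.endswith(suffix):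
--             return hostname[:-len(suffix)]
--     return hostname
--
-- def format_aggregate_to_aggregate_uplinks(neighbors, current_hostname):
--     """
--     Special formatting for aggregate switches connecting to each other.
--     Shows the peer aggregate switch and the ports on both sides.
--     """
--     agg_connections = []
--
--     # Clean the current hostname for comparison
--     clean_current = clean_hostname(current_hostname)
--
--     for neighbor in neighbors:
--         neighbor_hostname = neighbor.get('neighbor_hostname', '')
--         clean_neighbor = clean_hostname(neighbor_hostname)
--
--         if is_aggregate_switch(neighbor_hostname) and clean_neighbor != clean_current:
--             local_port = neighbor.get('local_interface', 'Unknown')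
--             remote_port = neighbor.get('remote_interface', 'Unknown')
--
--             agg_connections.append({
--                 'peer': clean_neighbor,
--                 'local_port': local_port,
--                 'remote_port': remote_port
--             })
--
--     if not agg_connections:
--         return "", ""
--
--     # Group by peer hostname
--     peer_groups = defaultdict(list)
--     for conn in agg_connections:
--         peer_groups[conn['peer']].append(conn)
--
--     agg_names = []
--     uplink_details = []
--
--     for peer_hostname, connections in sorted(peer_groups.items()):
--         agg_names.append(peer_hostname)
--
--         if len(connections) == 1:
--             conn = connections[0]
--             uplink_details.append(f"{peer_hostname}: Local {conn['local_port']} <-> Remote {conn['remote_port']}")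
--         else:
--             ports_info = []
--             for idx, conn in enumerate(connections, 1):
--                 ports_info.append(f"Link {idx}: Local {conn['local_port']} <-> Remote {conn['remote_port']}")
--             uplink_details.append(f"{peer_hostname}: {'; '.join(ports_info)}")
--
--     aggregate_switch_str = " and ".join(agg_names)
--     uplink_port_str = " | ".join(uplink_details)
--
--     return aggregate_switch_str, uplink_port_str
-- ===== SOURCE B (Python) =====
-- def is_aggregate_switch(hostname):
--     return 'SMSAGG' in hostname.upper()
--
-- def clean_hostname(hostname):
--     if not hostname:
--         return hostname
--     for suffix in ['.CAM.INT', '.cam.int', '.local']: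
--         if hostname.endswith(suffix):
--             return hostname[:-len(suffix)]
--     return hostname
--
-- def format_aggregate_to_aggregate_uplinks(neighbors, current_hostname):
--     clean_current = clean_hostname(current_hostname)
--     conns = [
--         (clean_hostname(n.get('neighbor_hostname', '')),
--          n.get('local_interface', 'Unknown'),
--          n.get('remote_interface', 'Unknown'))
--         for n in neighbors
--         if is_aggregate_switch(n.get('neighbor_hostname', ''))
--         and clean_hostname(n.get('neighbor_hostname', '')) != clean_current
--     ]
--     if not conns:
--         return "", ""
--     peers = sorted({p for p, _, _ in conns})
--     details = []
--     for peer in peers: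
--         grp = [c for c in conns if c[0] == peer]
--         if len(grp) == 1:
--             _, lp, rp = grp[0]
--             details.append(f"{peer}: Local {lp} <-> Remote {rp}")
--         else:
--             links = "; ".join(f"Link {i}: Local {lp} <-> Remote {rp}"
--                               for i, (_, lp, rp) in enumerate(grp, 1))
--             details.append(f"{peer}: {links}")
--     return " and ".join(peers), " | ".join(details)
-- ===== Notes on version B (the rewrite author's own statement) =====
-- stated objective: alternative
-- what changed: Replaces A's defaultdict grouping followed by sorting the (key, group) items with a direct plan: build the filtered connection triples once, sort the distinct peer names, and re-scan the connection list per peer to materialize each group.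
import Mathlib
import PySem

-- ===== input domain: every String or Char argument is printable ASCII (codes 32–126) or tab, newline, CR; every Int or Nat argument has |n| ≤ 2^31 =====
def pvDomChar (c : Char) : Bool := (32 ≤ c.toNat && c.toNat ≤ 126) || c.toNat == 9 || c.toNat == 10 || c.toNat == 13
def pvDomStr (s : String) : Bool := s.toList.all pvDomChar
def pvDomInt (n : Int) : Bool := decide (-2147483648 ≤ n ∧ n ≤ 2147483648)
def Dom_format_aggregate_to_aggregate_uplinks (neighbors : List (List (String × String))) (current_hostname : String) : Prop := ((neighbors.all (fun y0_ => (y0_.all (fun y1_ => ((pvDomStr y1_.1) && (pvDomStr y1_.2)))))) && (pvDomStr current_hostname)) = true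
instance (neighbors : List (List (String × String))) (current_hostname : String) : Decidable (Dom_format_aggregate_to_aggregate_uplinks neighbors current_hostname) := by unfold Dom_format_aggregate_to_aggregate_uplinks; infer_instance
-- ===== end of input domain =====

-- B replaces A's defaultdict-grouping-then-sort-items pass by sorting the distinct peer
-- names and re-scanning the connection list per peer (alternative decomposition, not faster).

-- ===== shared module helpers (clean_hostname / is_aggregate_switch / dict.get, used verbatim by both Pythons) =====

-- clean_hostname: the for-loop over the three suffixes with early return, as an if-chain
def pyCleanHostname (h : String) : String :=
  if h == "" then h
  else if PySem.Str.endswith h ".CAM.INT" then PySem.Str.slice h none (some (-8))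
  else if PySem.Str.endswith h ".cam.int" then PySem.Str.slice h none (some (-8))
  else if PySem.Str.endswith h ".local" then PySem.Str.slice h none (some (-6))
  else h

def pyIsAggregateSwitch (h : String) : Bool := PySem.Str.isIn "SMSAGG" (PySem.Str.upper h)

-- neighbor.get(k, d): first-match lookup in the association list
def pyGetSD (nb : List (String × String)) (k d : String) : String :=
  ((nb.find? (fun p => p.1 == k)).map (fun p => p.2)).getD d

-- the connection record {'peer':…, 'local_port':…, 'remote_port':…} as a triple
def pvConn (nb : List (String × String)) : String × String × String :=
  (pyCleanHostname (pyGetSD nb "neighbor_hostname" ""),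
   pyGetSD nb "local_interface" "Unknown",
   pyGetSD nb "remote_interface" "Unknown")

-- the filter condition of both Pythons
def pvKeep (cc : String) (nb : List (String × String)) : Bool :=
  pyIsAggregateSwitch (pyGetSD nb "neighbor_hostname" "") &&
  !(pyCleanHostname (pyGetSD nb "neighbor_hostname" "") == cc)

-- ===== PORT A =====

-- A's per-group formatting (the body of A's final for-loop for one (peer, connections) item)
def fmtGroupA (peer : String) (grp : List (String × String × String)) : String :=
  if grp.length == 1 then
    let c := grp.headD ("", "", "")
    peer ++ ": Local " ++ c.2.1 ++ " <-> Remote " ++ c.2.2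
  else
    let ports_info := (PySem.List.enumerate grp 1).foldl
      (fun acc ic =>
        acc ++ ["Link " ++ PySem.Int.toStr ic.1 ++ ": Local " ++ ic.2.2.1 ++ " <-> Remote " ++ ic.2.2.2]) []
    peer ++ ": " ++ PySem.Str.join "; " ports_info

def format_aggregate_to_aggregate_uplinks (neighbors : List (List (String × String))) (current_hostname : String) : String × String :=
  let clean_current := pyCleanHostname current_hostname
  let agg_connections := neighbors.foldl
    (fun acc nb => if pvKeep clean_current nb then acc ++ [pvConn nb] else acc) []
  if agg_connections.isEmpty then ("", "")
  else
    let peer_groups := agg_connections.foldl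
      (fun d c => d.modify c.1 [] (fun x => x ++ [c])) PySem.Dict.empty
    -- sorted(peer_groups.items()): exact as sort by key, since dict keys are distinct
    -- (Python never compares the second components of the pairs)
    let sortedItems := PySem.List.sorted peer_groups.items (fun p => p.1)
    let r := sortedItems.foldl
      (fun st p => (st.1 ++ [p.1], st.2 ++ [fmtGroupA p.1 p.2])) ([], [])
    (PySem.Str.join " and " r.1, PySem.Str.join " | " r.2)

-- ===== PORT B =====

-- B's per-group formatting (singleton vs enumerate, built with a generator/map)
def fmtGroupB (peer : String) (grp : List (String × String × String)) : String :=
  if grp.length == 1 then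
    let c := grp.headD ("", "", "")
    peer ++ ": Local " ++ c.2.1 ++ " <-> Remote " ++ c.2.2
  else
    peer ++ ": " ++ PySem.Str.join "; "
      ((PySem.List.enumerate grp 1).map
        (fun ic => "Link " ++ PySem.Int.toStr ic.1 ++ ": Local " ++ ic.2.2.1 ++ " <-> Remote " ++ ic.2.2.2))

def format_aggregate_to_aggregate_uplinks_alt (neighbors : List (List (String × String))) (current_hostname : String) : String × String :=
  let clean_current := pyCleanHostname current_hostname
  let conns := (neighbors.filter (pvKeep clean_current)).map pvConn
  if conns.isEmpty then ("", "")
  else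
    let peers := PySem.List.sorted (PySem.Set.ofList (conns.map (fun c => c.1))) (fun s => s)
    let details := peers.map (fun peer => fmtGroupB peer (conns.filter (fun c => c.1 == peer)))
    (PySem.Str.join " and " peers, PySem.Str.join " | " details)

-- ===== PRECONDITION & SPEC =====
def Spec_format_aggregate_to_aggregate_uplinks (neighbors : List (List (String × String))) (current_hostname : String) (out : String × String) : Prop := out = format_aggregate_to_aggregate_uplinks_alt neighbors current_hostname
instance (neighbors : List (List (String × String))) (current_hostname : String) (out : String × String) : Decidable (Spec_format_aggregate_to_aggregate_uplinks neighbors current_hostname out) := by unfold Spec_format_aggregate_to_aggregate_uplinks; infer_instance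

-- ===== CLAIM (what is proved, stated in full; the proofs are below) =====
def Claim_equal_format_aggregate_to_aggregate_uplinks : Prop := ∀ (neighbors : List (List (String × String))) (current_hostname : String), Dom_format_aggregate_to_aggregate_uplinks neighbors current_hostname → Spec_format_aggregate_to_aggregate_uplinks neighbors current_hostname (format_aggregate_to_aggregate_uplinks neighbors current_hostname)

-- ===== LEMMAS AND PROOFS =====

-- the two per-group formatters agree (append-loop vs map)
lemma fmtGroup_eq (peer : String) (grp : List (String × String × String)) :
    fmtGroupA peer grp = fmtGroupB peer grp := by
  simp only [fmtGroupA, fmtGroupB, PySem.List.foldl_append_singleton_eq_map, List.nil_append]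

-- sorting (k, g k) pairs by their first component = mapping g over the sorted keys
lemma sorted_map_pair {ν : Type} (ks : List String) (g : String → ν) (hnd : ks.Nodup) :
    PySem.List.sorted (ks.map (fun k => (k, g k))) (fun p => p.1)
      = (PySem.List.sorted ks (fun s => s)).map (fun k => (k, g k)) := by
  apply PySem.List.sorted_eq_of_perm_of_pairwise_lt
  · exact List.Perm.map _ (PySem.List.sorted_perm ks (fun s => s) false)
  · rw [List.pairwise_map]
    have hle : List.Pairwise (fun a b : String => a ≤ b) (PySem.List.sorted ks (fun s => s)) :=
      PySem.List.sorted_pairwise ks (fun s => s)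
    have hnd' : (PySem.List.sorted ks (fun s => s)).Nodup :=
      ((PySem.List.sorted_perm ks (fun s => s) false).nodup_iff).mpr hnd
    exact (List.Pairwise.and hnd' hle).imp (fun h => lt_of_le_of_ne h.2 h.1)

-- each dict group is the filter of the connection list at its key
lemma getD_groups (conns : List (String × String × String)) (k : String) :
    (conns.foldl (fun d c => d.modify c.1 [] (fun x => x ++ [c])) PySem.Dict.empty).getD k []
      = conns.filter (fun c => c.1 == k) := by
  have h1 : conns.foldl (fun d c => d.modify c.1 [] (fun x => x ++ [c]))
        (PySem.Dict.empty : PySem.Dict String (List (String × String × String)))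
      = (conns.map (fun c => (c.1, c))).foldl
          (fun d p => d.modify p.1 [] (fun x => x ++ [p.2])) PySem.Dict.empty := by
    rw [List.foldl_map]
  rw [h1, PySem.Dict.getD_foldl_modify_append]
  simp [List.filter_map, List.map_map, Function.comp_def]

-- the whole non-empty branch of both programs, over the common connection list
lemma branch_eq (conns : List (String × String × String)) :
    (let peer_groups := conns.foldl (fun d c => d.modify c.1 [] (fun x => x ++ [c])) PySem.Dict.empty
     let sortedItems := PySem.List.sorted peer_groups.items (fun p => p.1)
     let r := sortedItems.foldl
       (fun st p => (st.1 ++ [p.1], st.2 ++ [fmtGroupA p.1 p.2])) (([] : List String), ([] : List String))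
     (PySem.Str.join " and " r.1, PySem.Str.join " | " r.2))
    = (let peers := PySem.List.sorted (PySem.Set.ofList (conns.map (fun c => c.1))) (fun s => s)
       let details := peers.map (fun peer => fmtGroupB peer (conns.filter (fun c => c.1 == peer)))
       (PySem.Str.join " and " peers, PySem.Str.join " | " details)) := by
  have hnd : (conns.foldl (fun d c => d.modify c.1 [] (fun x => x ++ [c])) PySem.Dict.empty).keys.Nodup :=
    PySem.Dict.nodup_keys_foldl_modify_key conns (fun c => c.1) [] (fun _ c => fun x => x ++ [c])
      PySem.Dict.empty List.nodup_nil
  have hkeys : (conns.foldl (fun d c => d.modify c.1 [] (fun x => x ++ [c])) PySem.Dict.empty).keys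
      = PySem.Set.ofList (conns.map (fun c => c.1)) :=
    PySem.Dict.keys_foldl_modify_key conns (fun c => c.1) [] (fun _ c => fun x => x ++ [c]) PySem.Dict.empty
  have hitems := PySem.Dict.items_eq_map_keys
    (conns.foldl (fun d c => d.modify c.1 [] (fun x => x ++ [c])) PySem.Dict.empty) hnd
    ([] : List (String × String × String))
  rw [hkeys] at hitems hnd
  simp only [hitems, getD_groups]
  rw [sorted_map_pair _ _ (PySem.Set.nodup_ofList _)]
  rw [PySem.List.foldl_prod_mk
    (fun (l : List String) (p : String × List (String × String × String)) => l ++ [p.1])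
    (fun (l : List String) (p : String × List (String × String × String)) => l ++ [fmtGroupA p.1 p.2])]
  rw [PySem.List.foldl_append_singleton_eq_map (fun p : String × List (String × String × String) => p.1),
    PySem.List.foldl_append_singleton_eq_map (fun p : String × List (String × String × String) => fmtGroupA p.1 p.2)]
  simp [List.map_map, Function.comp_def, fmtGroup_eq]

-- ===== VERDICT (by name: the statement is the Claim_ definition above) =====
theorem format_aggregate_to_aggregate_uplinks_spec : Claim_equal_format_aggregate_to_aggregate_uplinks := by
  intro neighbors current_hostname _
  unfold Spec_format_aggregate_to_aggregate_uplinks format_aggregate_to_aggregate_uplinks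
    format_aggregate_to_aggregate_uplinks_alt
  have hconns : neighbors.foldl
      (fun acc nb => if pvKeep (pyCleanHostname current_hostname) nb then acc ++ [pvConn nb] else acc) []
      = (neighbors.filter (pvKeep (pyCleanHostname current_hostname))).map pvConn := by
    simpa using PySem.List.foldl_append_if (pvKeep (pyCleanHostname current_hostname)) pvConn neighbors []
  simp only [hconns]
  by_cases h : ((neighbors.filter (pvKeep (pyCleanHostname current_hostname))).map pvConn).isEmpty
  · simp only [h, if_true]
  · simp only [h]
    exact branch_eq _
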